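-- pv_equiv track=rewrite | github.com/Syzseisus/Algorithm | Programmers/43238_Immigration.py | solution
-- ===== SOURCE A (Python) =====
-- def cpo(guess, times):
--     cnt = 0
--     for time in times:
--         cnt += guess // time    # 해당 시간 동안 심사관 한 명이 맡을 수 있는 사람 수
--     return cnt
--
-- def solution(n, times):
--     lb = 1                  # Lower Bound
--     ub = min(times) * n     # Upper Bound = 혼자서 n명 다 하는 거
--
--     while lb <= ub:
--         guess = (lb + ub) // 2      # lb와 ub 중간값으로 추정
--         if cpo(guess, times) >= n:  # 1. 추정 값에 대한 return이 n 이상: 시간이 충분함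
--             answer = guess          #    -> 일단 답으로 저장하고
--             ub = guess - 1          #       그보다 낮은 값으로도 가능할지 확인 (ub 내림)
--         else:                       # 2. n 미만: 시간이 부족함
--             lb = guess + 1          #    -> lb 올림
--
--     return answer
-- ===== SOURCE B (Python) =====
-- def solution(n, times):
--     def feasible(t):
--         return sum(t // time for time in times) >= n
--
--     def least_feasible(lo, hi):
--         """Smallest t in [lo, hi] with feasible(t); ValueError if none."""
--         if lo > hi:
--             raise ValueError("no feasible time in range")
--         mid = (lo + hi) // 2
--         if feasible(mid):
--             try:
--                 return least_feasible(lo, mid - 1)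
--             except ValueError:
--                 return mid
--         return least_feasible(mid + 1, hi)
--
--     return least_feasible(1, min(times) * n)
-- ===== Notes on version B (the rewrite author's own statement) =====
-- stated objective: alternative
-- what changed: Replaces the answer-accumulating inclusive-bounds while loop with a recursive backtracking binary search (smallest feasible value in [lo,hi], ValueError when the range has none) that needs no best-so-far variable, and computes feasibility with a sum() generator instead of the cpo counter loop.
-- outside the precondition, e.g. on solution(-2, [-3]): A returns 1, B returns 1; on solution(0, [1]): A raises UnboundLocalError, B raises ValueError; on solution(1, []): A raises ValueError, B raises ValueError
import Mathlib
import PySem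

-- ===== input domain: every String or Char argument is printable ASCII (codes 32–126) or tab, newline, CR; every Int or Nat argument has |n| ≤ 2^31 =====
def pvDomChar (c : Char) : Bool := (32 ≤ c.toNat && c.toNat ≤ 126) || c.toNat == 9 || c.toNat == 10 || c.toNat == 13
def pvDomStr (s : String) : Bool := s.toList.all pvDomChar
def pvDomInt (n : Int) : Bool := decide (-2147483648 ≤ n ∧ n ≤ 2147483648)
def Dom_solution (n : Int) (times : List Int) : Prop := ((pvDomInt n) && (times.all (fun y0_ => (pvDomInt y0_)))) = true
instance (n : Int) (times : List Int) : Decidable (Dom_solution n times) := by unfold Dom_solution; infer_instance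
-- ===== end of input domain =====

-- B rewrites A's answer-accumulating while loop as a recursive backtracking binary search
-- (ValueError = no feasible time in range) (objective: alternative decomposition, same cost).

-- ===== PORT A =====
def cpo (guess : Int) (times : List Int) : Int :=
  times.foldl (fun cnt time => cnt + PySem.Int.floordiv guess time) 0

-- A's while loop; ans = the (initially unbound) variable `answer`; none = unbound (UnboundLocalError, outside Pre_)
def solutionGo (n : Int) (times : List Int) (lb ub : Int) (ans : Option Int) : Option Int :=
  if lb ≤ ub then
    let guess := PySem.Int.floordiv (lb + ub) 2
    if cpo guess times ≥ n then
      solutionGo n times lb (guess - 1) (some guess)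
    else
      solutionGo n times (guess + 1) ub ans
  else ans
termination_by (ub + 1 - lb).toNat
decreasing_by
  · have h := PySem.Int.floordiv_two_mid_bounds ‹lb ≤ ub›
    omega
  · have h := PySem.Int.floordiv_two_mid_bounds ‹lb ≤ ub›
    omega

def solution (n : Int) (times : List Int) : Int :=
  match PySem.List.min? times (fun x => x) with
  | none => 0   -- Python min([]) raises ValueError; outside Pre_
  | some tmin => (solutionGo n times 1 (tmin * n) none).getD 0  -- getD 0: `answer` unbound only outside Pre_

-- ===== PORT B =====
def feasibleB (n : Int) (times : List Int) (t : Int) : Bool :=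
  decide (n ≤ (times.map (fun time => PySem.Int.floordiv t time)).sum)

-- smallest t in [lo, hi] with feasibleB; none = the ValueError raise (outside Pre_)
def leastFeasB (n : Int) (times : List Int) (lo hi : Int) : Option Int :=
  if lo > hi then none
  else
    let mid := PySem.Int.floordiv (lo + hi) 2
    if feasibleB n times mid then
      match leastFeasB n times lo (mid - 1) with
      | none => some mid
      | some v => some v
    else leastFeasB n times (mid + 1) hi
termination_by (hi + 1 - lo).toNat
decreasing_by
  · have h := PySem.Int.floordiv_two_mid_bounds (show lo ≤ hi by omega)
    omega
  · have h := PySem.Int.floordiv_two_mid_bounds (show lo ≤ hi by omega)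
    omega

def solution_alt (n : Int) (times : List Int) : Int :=
  match PySem.List.min? times (fun x => x) with
  | none => 0   -- min([]) raises in Python; outside Pre_
  | some tmin => (leastFeasB n times 1 (tmin * n)).getD 0   -- getD 0: the uncaught ValueError, outside Pre_

-- ===== PRECONDITION & SPEC =====
-- Pre_ restricts to the problem's natural domain (at least one person, nonempty positive
-- check times): outside it A raises on most inputs (ValueError on [], ZeroDivisionError on
-- a 0 time, UnboundLocalError otherwise), and the remaining negative-n/negative-times
-- inputs lie outside the task's meaningful domain (the summed quotient is not monotone there).
def Pre_solution (n : Int) (times : List Int) : Prop :=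
  1 ≤ n ∧ times ≠ [] ∧ ∀ t ∈ times, 1 ≤ t
instance (n : Int) (times : List Int) : Decidable (Pre_solution n times) := by
  unfold Pre_solution; infer_instance

def pvWitness_solution : Int × List Int := (6, [7, 10])

def Spec_solution (n : Int) (times : List Int) (out : Int) : Prop := out = solution_alt n times
instance (n : Int) (times : List Int) (out : Int) : Decidable (Spec_solution n times out) := by unfold Spec_solution; infer_instance

-- ===== CLAIM (what is proved, stated in full; the proofs are below) =====
def Claim_equal_solution : Prop := ∀ (n : Int) (times : List Int), Dom_solution n times → Pre_solution n times → Spec_solution n times (solution n times)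

-- ===== LEMMAS AND PROOFS =====

-- the summed-quotient value both programs test against n
def Fsum (times : List Int) (t : Int) : Int :=
  (times.map (fun time => PySem.Int.floordiv t time)).sum

lemma cpo_eq_Fsum (g : Int) (times : List Int) : cpo g times = Fsum times g := by
  unfold cpo Fsum
  simpa using PySem.List.foldl_add (l := times) (a := 0)
    (g := fun time => PySem.Int.floordiv g time)

lemma Fsum_mono (times : List Int) (hpos : ∀ t ∈ times, 1 ≤ t) {a b : Int} (hab : a ≤ b) :
    Fsum times a ≤ Fsum times b := by
  unfold Fsum
  apply List.sum_le_sum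
  intro t ht
  have h1 : (0:Int) < t := by have := hpos t ht; omega
  rw [PySem.Int.floordiv_eq_ediv_of_pos h1, PySem.Int.floordiv_eq_ediv_of_pos h1]
  exact Int.ediv_le_ediv h1 hab

lemma Fsum_ub_feasible (n : Int) (times : List Int) (tmin : Int)
    (hn : 1 ≤ n) (hpos : ∀ t ∈ times, 1 ≤ t) (hmem : tmin ∈ times) :
    n ≤ Fsum times (tmin * n) := by
  have htmin : (0:Int) < tmin := by have := hpos tmin hmem; omega
  have hu : (0:Int) ≤ tmin * n := by positivity
  have hterm : PySem.Int.floordiv (tmin * n) tmin = n := by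
    rw [PySem.Int.floordiv_eq_ediv_of_pos htmin]
    exact Int.mul_ediv_cancel_left n (by omega)
  have hmm : PySem.Int.floordiv (tmin * n) tmin ∈
      times.map (fun time => PySem.Int.floordiv (tmin * n) time) :=
    List.mem_map_of_mem hmem
  have := List.single_le_sum (l := times.map (fun time => PySem.Int.floordiv (tmin * n) time))
    (fun x hx => by
      obtain ⟨t, ht, rfl⟩ := List.mem_map.1 hx
      have h1 : (0:Int) < t := by have := hpos t ht; omega
      rw [PySem.Int.floordiv_eq_ediv_of_pos h1]
      exact Int.ediv_nonneg hu (by omega))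
    _ hmm
  unfold Fsum
  omega

-- A's loop returns exactly the least feasible time m, given the loop invariant
lemma solutionGo_eq (n : Int) (times : List Int) (m : Int)
    (hpos : ∀ t ∈ times, 1 ≤ t)
    (hmf : n ≤ Fsum times m)
    (hleast : ∀ t : Int, 1 ≤ t → n ≤ Fsum times t → m ≤ t) :
    ∀ k (lb ub : Int) (ans : Option Int), (ub + 1 - lb).toNat = k →
      1 ≤ lb → lb ≤ m → (m ≤ ub ∨ ans = some m) →
      solutionGo n times lb ub ans = some m := by
  intro k
  induction k using Nat.strong_induction_on with
  | _ k ih =>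
    intro lb ub ans hk hlb1 hlbm hinv
    rw [solutionGo]
    by_cases hle : lb ≤ ub
    · simp only [hle, if_true]
      have hmid := PySem.Int.floordiv_two_mid_bounds hle
      set guess := PySem.Int.floordiv (lb + ub) 2 with hg
      rw [cpo_eq_Fsum]
      by_cases hfeas : Fsum times guess ≥ n
      · simp only [hfeas, if_true]
        have hmg : m ≤ guess := hleast guess (by omega) hfeas
        exact ih ((guess - 1) + 1 - lb).toNat (by omega) lb (guess - 1) (some guess)
          rfl hlb1 hlbm (hmg.lt_or_eq.elim (fun h => Or.inl (by omega))
            (fun h => Or.inr (by rw [h])))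
      · simp only [hfeas, if_false]
        have hgm : guess < m := by
          by_contra hc
          exact hfeas (le_trans hmf (Fsum_mono times hpos (by omega)))
        exact ih (ub + 1 - (guess + 1)).toNat (by omega) (guess + 1) ub ans
          rfl (by omega) (by omega) hinv
    · simp only [hle, if_false]
      rcases hinv with h | h
      · omega
      · exact h

-- B's backtracking search yields the least feasible time m when m ≤ hi, none otherwise
lemma leastFeasB_eq (n : Int) (times : List Int) (m : Int)
    (hpos : ∀ t ∈ times, 1 ≤ t) (hmf : n ≤ Fsum times m)
    (hleast : ∀ t : Int, 1 ≤ t → n ≤ Fsum times t → m ≤ t) :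
    ∀ k (lo hi : Int), (hi + 1 - lo).toNat = k →
      1 ≤ lo → lo ≤ m →
      leastFeasB n times lo hi = if m ≤ hi then some m else none := by
  intro k
  induction k using Nat.strong_induction_on with
  | _ k ih =>
    intro lo hi hk hlo1 hlom
    rw [leastFeasB]
    by_cases hle : lo > hi
    · simp only [hle, if_true]
      rw [if_neg (by omega)]
    · simp only [hle, if_false]
      have hmid := PySem.Int.floordiv_two_mid_bounds (show lo ≤ hi by omega)
      set mid := PySem.Int.floordiv (lo + hi) 2 with hmiddef
      by_cases hfeas : feasibleB n times mid
      · simp only [hfeas, if_true]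
        have hfeas' : n ≤ Fsum times mid := of_decide_eq_true hfeas
        have hmm : m ≤ mid := hleast mid (by omega) hfeas'
        rw [ih (mid - 1 + 1 - lo).toNat (by omega) lo (mid - 1) rfl hlo1 hlom]
        by_cases hsub : m ≤ mid - 1
        · rw [if_pos hsub, if_pos (by omega)]
        · rw [if_neg hsub, if_pos (by omega)]
          have : m = mid := by omega
          rw [this]
      · simp only [hfeas]
        have hfeas' : ¬ n ≤ Fsum times mid := by
          intro hc; exact hfeas (decide_eq_true hc)
        have hgm : mid < m := by
          by_contra hc
          exact hfeas' (le_trans hmf (Fsum_mono times hpos (by omega)))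
        exact ih (hi + 1 - (mid + 1)).toNat (by omega) (mid + 1) hi rfl (by omega) (by omega)

-- ===== VERDICT (by name: the statement is the Claim_ definition above) =====
theorem solution_spec : Claim_equal_solution := by
  intro n times _hdom hpre
  obtain ⟨hn, hne, hpos⟩ := hpre
  unfold Spec_solution solution solution_alt
  obtain ⟨tmin, htm⟩ : ∃ tmin, PySem.List.min? times (fun x => x) = some tmin := by
    cases h : PySem.List.min? times (fun x => x) with
    | none => exact absurd ((PySem.List.min?_eq_none_iff times (fun x => x)).1 h) hne
    | some v => exact ⟨v, rfl⟩
  have hmem : tmin ∈ times := PySem.List.min?_mem htm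
  have htmin1 : 1 ≤ tmin := hpos tmin hmem
  have hub1 : 1 ≤ tmin * n := by nlinarith
  have hubfeas : n ≤ Fsum times (tmin * n) := Fsum_ub_feasible n times tmin hn hpos hmem
  obtain ⟨m, ⟨hm1, hmf⟩, hleast'⟩ :=
    Int.exists_least_of_bdd (P := fun t => 1 ≤ t ∧ n ≤ Fsum times t)
      ⟨1, fun z hz => hz.1⟩ ⟨tmin * n, hub1, hubfeas⟩
  have hleast : ∀ t : Int, 1 ≤ t → n ≤ Fsum times t → m ≤ t :=
    fun t h1 h2 => hleast' t ⟨h1, h2⟩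
  have hmub : m ≤ tmin * n := hleast (tmin * n) hub1 hubfeas
  rw [htm]
  show (solutionGo n times 1 (tmin * n) none).getD 0 = (leastFeasB n times 1 (tmin * n)).getD 0
  rw [solutionGo_eq n times m hpos hmf hleast (tmin * n + 1 - 1).toNat 1 (tmin * n) none
    rfl le_rfl hm1 (Or.inl hmub)]
  rw [leastFeasB_eq n times m hpos hmf hleast (tmin * n + 1 - 1).toNat 1 (tmin * n)
    rfl le_rfl hm1, if_pos hmub]
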